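-- pv_equiv track=rewrite | github.com/EvelynMurasaki/automacao | Script-dia-a-dia/wordlist-personalizada.py | gerar_leet_variacoes
-- ===== SOURCE A (Python) =====
-- import itertools
--
-- leet_dict = {
--     'a': ['a', '4', '@'],
--     'b': ['b', '8'],
--     'e': ['e', '3'],
--     'g': ['g', '9', '6'],
--     'i': ['i', '1', '!'],
--     'l': ['l', '1', '|'],
--     'o': ['o', '0'],
--     's': ['s', '5', '$'],
--     't': ['t', '7', '+'],
--     'm': ['m', 'M'],
--     'n': ['n', 'N']
-- }
--
-- def gerar_leet_variacoes(palavra):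
--     possibilidades = []
--     for letra in palavra:
--         if letra.lower() in leet_dict:
--             possibilidades.append(leet_dict[letra.lower()])
--         else:
--             possibilidades.append([letra])
--
--     return ["".join(p) for p in itertools.product(*possibilidades)]
-- ===== SOURCE B (Python) =====
-- leet_dict = {
--     'a': ['a', '4', '@'],
--     'b': ['b', '8'],
--     'e': ['e', '3'],
--     'g': ['g', '9', '6'],
--     'i': ['i', '1', '!'],
--     'l': ['l', '1', '|'],
--     'o': ['o', '0'],
--     's': ['s', '5', '$'],
--     't': ['t', '7', '+'],
--     'm': ['m', 'M'],
--     'n': ['n', 'N']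
-- }
--
-- def gerar_leet_variacoes(palavra):
--     # Incremental Cartesian product: extend every prefix built so far by each
--     # option of the current letter (last letter varies fastest, like A).
--     result = ['']
--     for letra in palavra:
--         options = leet_dict.get(letra.lower(), [letra])
--         result = [prefix + opt for prefix in result for opt in options]
--     return result
-- ===== Notes on version B (the rewrite author's own statement) =====
-- stated objective: simpler
-- what changed: Replaces the two-phase build-option-lists-then-itertools.product-then-join pipeline with a single pass that folds each letter's options into an accumulated list of prefixes, never materialising tuples.
import Mathlib
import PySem

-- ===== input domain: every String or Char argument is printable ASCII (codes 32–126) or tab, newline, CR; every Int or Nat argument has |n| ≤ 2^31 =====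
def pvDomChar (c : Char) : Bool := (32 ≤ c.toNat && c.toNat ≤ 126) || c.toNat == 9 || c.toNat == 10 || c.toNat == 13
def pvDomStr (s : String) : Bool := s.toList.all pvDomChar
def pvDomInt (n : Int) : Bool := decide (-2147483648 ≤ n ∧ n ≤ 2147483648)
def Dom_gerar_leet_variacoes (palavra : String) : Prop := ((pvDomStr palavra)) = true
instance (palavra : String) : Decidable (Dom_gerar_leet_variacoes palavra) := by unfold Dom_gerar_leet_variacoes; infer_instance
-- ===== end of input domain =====

-- ===== PORT A =====
-- B replaces the build-options / itertools.product / join pipeline by one incremental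
-- accumulation over the word (objective: simpler); same return value, no side effects.

-- the module-level leet_dict (an association list, insertion order)
def leetDict : List (Char × List String) :=
  [('a', ["a", "4", "@"]), ('b', ["b", "8"]), ('e', ["e", "3"]),
   ('g', ["g", "9", "6"]), ('i', ["i", "1", "!"]), ('l', ["l", "1", "|"]),
   ('o', ["o", "0"]), ('s', ["s", "5", "$"]), ('t', ["t", "7", "+"]),
   ('m', ["m", "M"]), ('n', ["n", "N"])]

-- itertools.product(*lists): tuples in lexicographic order, first list outermost (exact)
def pyProduct : List (List String) → List (List String)
  | [] => [[]]
  | l :: ls => l.flatMap (fun x => (pyProduct ls).map (fun p => x :: p))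

-- "".join(p): concatenation of the parts (exact for the empty separator)
def joinAll (p : List String) : String := p.foldr (fun x acc => x ++ acc) ""

def gerar_leet_variacoes (palavra : String) : List String :=
  let possibilidades := palavra.toList.foldl (fun acc letra =>
    match leetDict.lookup (PySem.Chars.lowerChar letra) with
    | some opts => acc ++ [opts]
    | none => acc ++ [[String.ofList [letra]]]) []
  (pyProduct possibilidades).map joinAll

-- ===== PORT B =====
-- leet_dict.get(letra.lower(), [letra])
def leetOptions (letra : Char) : List String :=
  match leetDict.lookup (PySem.Chars.lowerChar letra) with
  | some opts => opts
  | none => [String.ofList [letra]]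

def gerar_leet_variacoes_alt (palavra : String) : List String :=
  palavra.toList.foldl (fun result letra =>
    result.flatMap (fun pre => (leetOptions letra).map (fun opt => pre ++ opt))) [""]

-- ===== PRECONDITION & SPEC =====
def Spec_gerar_leet_variacoes (palavra : String) (out : List String) : Prop := out = gerar_leet_variacoes_alt palavra
instance (palavra : String) (out : List String) : Decidable (Spec_gerar_leet_variacoes palavra out) := by unfold Spec_gerar_leet_variacoes; infer_instance

-- ===== CLAIM (what is proved, stated in full; the proofs are below) =====
def Claim_equal_gerar_leet_variacoes : Prop := ∀ (palavra : String), Dom_gerar_leet_variacoes palavra → Spec_gerar_leet_variacoes palavra (gerar_leet_variacoes palavra)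

-- ===== LEMMAS AND PROOFS =====

theorem poss_eq (cs : List Char) (acc : List (List String)) :
    cs.foldl (fun acc letra =>
      match leetDict.lookup (PySem.Chars.lowerChar letra) with
      | some opts => acc ++ [opts]
      | none => acc ++ [[String.ofList [letra]]]) acc = acc ++ cs.map leetOptions := by
  induction cs generalizing acc with
  | nil => simp
  | cons c cs ih =>
    simp only [List.foldl_cons, List.map_cons, ih, leetOptions]
    cases leetDict.lookup (PySem.Chars.lowerChar c) <;> simp

theorem fold_eq_product (cs : List Char) (acc : List String) :
    cs.foldl (fun result letra =>
      result.flatMap (fun pre => (leetOptions letra).map (fun opt => pre ++ opt))) acc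
    = acc.flatMap (fun pre => (pyProduct (cs.map leetOptions)).map (fun p => pre ++ joinAll p)) := by
  induction cs generalizing acc with
  | nil => simp [pyProduct, joinAll]
  | cons l ls ih =>
    simp only [List.foldl_cons, ih, joinAll, List.flatMap_assoc, List.flatMap_map]
    refine List.flatMap_congr (fun pre _ => ?_)
    simp [pyProduct, List.map_flatMap, List.map_map, Function.comp_def, String.append_assoc]

-- ===== VERDICT (by name: the statement is the Claim_ definition above) =====
theorem gerar_leet_variacoes_spec : Claim_equal_gerar_leet_variacoes := by
  intro palavra _
  show gerar_leet_variacoes palavra = gerar_leet_variacoes_alt palavra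
  simp only [gerar_leet_variacoes, gerar_leet_variacoes_alt, poss_eq, List.nil_append]
  rw [fold_eq_product]
  simp
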